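-- pv_equiv track=rewrite | github.com/cokkum113/202tooAlgo | sss.py | solution
-- ===== SOURCE A (Python) =====
-- def solution(n, plans, clients):
--     answer = []
--     for cl in clients:
--         cl = cl.split()
--         want_giga = cl[0]
--         want_service = cl[1:]
--         aa = 0
--
--
--         for index, t in enumerate(plans):
--             t = t.split()
--             giga = t[0]
--             service = t[1:]
--             if want_giga <= giga:
--                 for i in want_service:
--                     if i not in service:
--                         continue
--                     else:
--                         aa = index + 1
--
--
--         answer.append(aa)
--
--
--     return answer
-- ===== SOURCE B (Python) =====
-- def solution(n, plans, clients):
--     if not clients: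
--         return []
--     tables = [(f[0], set(f[1:])) for f in (p.split() for p in plans)]
--     def last_match(cl):
--         parts = cl.split()
--         want_giga = parts[0]
--         want_service = parts[1:]
--         for idx in range(len(tables), 0, -1):
--             giga, services = tables[idx - 1]
--             if want_giga <= giga:
--                 for s in want_service:
--                     if s in services:
--                         return idx
--         return 0
--     return [last_match(cl) for cl in clients]
-- ===== Notes on version B (the rewrite author's own statement) =====
-- stated objective: faster
-- what changed: B splits every plan string once up front instead of re-splitting all plans for every client, and per client walks the plan indices backwards returning the first (i.e. last) matching 1-based index immediately, replacing A's forward full scan with a nested overwrite loop.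
import Mathlib
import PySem

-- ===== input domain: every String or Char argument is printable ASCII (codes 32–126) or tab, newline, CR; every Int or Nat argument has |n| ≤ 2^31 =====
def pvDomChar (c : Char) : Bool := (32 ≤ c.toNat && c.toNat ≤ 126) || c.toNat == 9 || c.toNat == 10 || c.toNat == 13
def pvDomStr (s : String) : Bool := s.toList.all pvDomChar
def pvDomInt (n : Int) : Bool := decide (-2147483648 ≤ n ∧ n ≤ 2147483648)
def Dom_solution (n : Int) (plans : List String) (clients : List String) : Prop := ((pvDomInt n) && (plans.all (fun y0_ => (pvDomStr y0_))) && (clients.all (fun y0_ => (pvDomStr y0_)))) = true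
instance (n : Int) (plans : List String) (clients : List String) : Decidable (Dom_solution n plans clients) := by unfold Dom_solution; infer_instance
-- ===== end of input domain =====

-- B splits every plan once up front into (giga, set of services) instead of re-splitting all plans
-- for every client, and per client scans the plan indices backwards, returning on the first (= last)
-- match; early exit + hoisted splitting make it measurably faster than A's forward overwrite scan.

-- ===== PORT A =====
def solution (n : Int) (plans : List String) (clients : List String) : List Int :=
  clients.foldl (fun answer cl0 =>
    let cl := PySem.Str.split₀ cl0
    let want_giga := PySem.List.pyGetD cl 0 ""
    let want_service := PySem.List.slice cl (some 1) none
    let aa : Int := (PySem.List.enumerate plans 0).foldl (fun aa it =>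
      let t := PySem.Str.split₀ it.2
      let giga := PySem.List.pyGetD t 0 ""
      let service := PySem.List.slice t (some 1) none
      if want_giga ≤ giga then
        want_service.foldl (fun aa i => if i ∈ service then it.1 + 1 else aa) aa
      else aa) 0
    answer ++ [aa]) []

-- ===== PORT B =====
-- '(f[0], set(f[1:])) for f in (p.split() for p in plans)'
def tabRow (p : String) : String × PySem.Set String :=
  let f := PySem.Str.split₀ p
  (PySem.List.pyGetD f 0 "", PySem.Set.ofList (PySem.List.slice f (some 1) none))

-- 'for idx in range(len(tables), 0, -1): … return idx' / 'return 0' — recursion on the countdown index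
def altScan (want_giga : String) (want_service : List String)
    (tables : List (String × PySem.Set String)) : Nat → Int
  | 0 => 0
  | k+1 =>
    let tg := PySem.List.pyGetD tables (k : Int) ("", [])
    if want_giga ≤ tg.1 ∧ want_service.any (fun s => s ∈ tg.2) then ((k : Int) + 1)
    else altScan want_giga want_service tables k

def solution_alt (n : Int) (plans : List String) (clients : List String) : List Int :=
  if clients.isEmpty then []
  else
    let tables := plans.map tabRow
    clients.map (fun cl0 =>
      let parts := PySem.Str.split₀ cl0
      altScan (PySem.List.pyGetD parts 0 "") (PySem.List.slice parts (some 1) none)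
        tables tables.length)

-- ===== PRECONDITION & SPEC =====
-- Pre_ excludes exactly the inputs where Python A raises IndexError on a '[0]' of an empty split():
-- a client string whose split() is empty, or (when some client exists) a plan string whose split() is empty.
def Pre_solution (n : Int) (plans : List String) (clients : List String) : Prop :=
  (∀ c ∈ clients, PySem.Str.split₀ c ≠ []) ∧
  (clients ≠ [] → ∀ p ∈ plans, PySem.Str.split₀ p ≠ [])
instance (n : Int) (plans : List String) (clients : List String) : Decidable (Pre_solution n plans clients) := by unfold Pre_solution; infer_instance

def pvWitness_solution : Int × List String × List String := (0, ["10 music art", "5 art"], ["5 art"])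

def Spec_solution (n : Int) (plans : List String) (clients : List String) (out : List Int) : Prop := out = solution_alt n plans clients
instance (n : Int) (plans : List String) (clients : List String) (out : List Int) : Decidable (Spec_solution n plans clients out) := by unfold Spec_solution; infer_instance

-- ===== CLAIM (what is proved, stated in full; the proofs are below) =====
def Claim_equal_solution : Prop := ∀ (n : Int) (plans : List String) (clients : List String), Dom_solution n plans clients → Pre_solution n plans clients → Spec_solution n plans clients (solution n plans clients)

-- ===== LEMMAS AND PROOFS =====

-- A's innermost loop: overwriting with the same constant on any hit is an 'any'
theorem foldl_if_mem_const {α : Type} [DecidableEq α] (l : List α) (srv : List α) (c a : Int) :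
    l.foldl (fun aa i => if i ∈ srv then c else aa) a
      = if l.any (fun i => i ∈ srv) then c else a := by
  induction l generalizing a with
  | nil => simp
  | cons x t ih => by_cases hx : x ∈ srv <;> simp [hx, ih]

theorem enumerate_append_singleton {α : Type} (xs : List α) (x : α) (s : Int) :
    PySem.List.enumerate (xs ++ [x]) s
      = PySem.List.enumerate xs s ++ [(s + xs.length, x)] := by
  induction xs generalizing s with
  | nil => simp [PySem.List.enumerate_nil, PySem.List.enumerate_cons]
  | cons y t ih =>
      simp [PySem.List.enumerate_cons, ih]
      ring

-- B's scan over xs ++ [x] with fuel ≤ |xs| never reads x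
theorem altScan_append (wg : String) (ws : List String)
    (xs : List (String × PySem.Set String)) (x : String × PySem.Set String) :
    ∀ k, k ≤ xs.length → altScan wg ws (xs ++ [x]) k = altScan wg ws xs k := by
  intro k
  induction k with
  | zero => intro _; rfl
  | succ m ih =>
      intro hm
      have hlt : m < xs.length := by omega
      have hget : PySem.List.pyGetD (xs ++ [x]) (m : Int) ("", [])
          = PySem.List.pyGetD xs (m : Int) ("", []) := by
        simp [PySem.List.pyGetD_natCast, List.getD, List.getElem?_append_left hlt]
      simp only [altScan, hget, ih (by omega)]

-- core equivalence of the two plan loops, by reverse induction on plans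
theorem loops_agree (wg : String) (ws : List String) (plans : List String) :
    (PySem.List.enumerate plans 0).foldl (fun aa it =>
        let t := PySem.Str.split₀ it.2
        let giga := PySem.List.pyGetD t 0 ""
        let service := PySem.List.slice t (some 1) none
        if wg ≤ giga then
          ws.foldl (fun aa i => if i ∈ service then it.1 + 1 else aa) aa
        else aa) 0
      = altScan wg ws (plans.map tabRow) (plans.map tabRow).length := by
  induction plans using List.reverseRecOn with
  | nil => rfl
  | append_singleton xs x ih =>
      rw [enumerate_append_singleton, List.foldl_append]
      simp only [List.foldl_cons, List.foldl_nil]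
      rw [ih]
      have hmap : (xs ++ [x]).map tabRow = xs.map tabRow ++ [tabRow x] := by simp
      have hget : PySem.List.pyGetD (xs.map tabRow ++ [tabRow x])
          (((xs.map tabRow).length : Nat) : Int) ("", []) = tabRow x := by
        rw [PySem.List.pyGetD_natCast]
        simp [List.getD]
      have hlen : (xs.map tabRow ++ [tabRow x]).length = (xs.map tabRow).length + 1 := by simp
      rw [hmap, hlen]
      simp only [altScan, hget, altScan_append wg ws (xs.map tabRow) (tabRow x) _ (le_refl _)]
      rw [foldl_if_mem_const]
      by_cases hg : wg ≤ PySem.List.pyGetD (PySem.Str.split₀ x) 0 ""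
      · by_cases ha : ws.any (fun i => i ∈ PySem.List.slice (PySem.Str.split₀ x) (some 1) none)
        · simp [tabRow, PySem.Set.mem_ofList, hg, ha]
        · simp [tabRow, PySem.Set.mem_ofList, hg, ha]
      · simp [tabRow, hg]

-- ===== VERDICT (by name: the statement is the Claim_ definition above) =====
theorem solution_spec : Claim_equal_solution := by
  intro n plans clients _ _
  unfold Spec_solution solution solution_alt
  by_cases hc : clients.isEmpty
  · rw [List.isEmpty_iff] at hc
    subst hc
    rfl
  · rw [if_neg hc, PySem.List.foldl_append_singleton_eq_map]
    simp only [List.nil_append]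
    apply List.map_congr_left
    intro cl0 _
    exact loops_agree _ _ plans
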